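-- pv_equiv track=rewrite | github.com/nyctef/advent-of-code | 2016-numpy/day11.py | normalize_floors
-- ===== SOURCE A (Python) =====
-- def normalize_floors(floors: list):
--     name_counter = 1
--     renames = {}
--     result = []
--     for floor in floors:
--         new_floor = []
--         for item in floor:
--             (typ, name) = item.split(" ")
--             if name in renames:
--                 name = renames[name]
--             else:
--                 renames[name] = name_counter
--                 name = name_counter
--                 name_counter += 1
--             new_floor.append(f"{typ} {name}")
--
--         result.append(new_floor)
--
--     return result
-- ===== SOURCE B (Python) =====
-- def normalize_floors(floors: list):
--     # Stamping sweep instead of a rename table: flatten all items into cells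
--     # [typ, name, label]; walk the cells, and each time the walk reaches a cell
--     # that is still unlabeled, stamp EVERY cell carrying that name with the next
--     # integer; finally rebuild the floor shape from the labeled cells.
--     cells = [[t, n, None]
--              for floor in floors
--              for t, n in (item.split(" ") for item in floor)]
--     counter = 1
--     for cell in cells:
--         if cell[2] is None:
--             for c in cells:
--                 if c[1] == cell[1]:
--                     c[2] = counter
--             counter += 1
--     it = iter(cells)
--     return [[f"{t} {k}" for t, _n, k in (next(it) for _ in floor)]
--             for floor in floors]
-- ===== Notes on version B (the rewrite author's own statement) =====
-- stated objective: alternative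
-- what changed: Replaces A's rename table (dict plus running counter consulted per item) by a stamping sweep: flatten all items into [typ, name, label] cells, walk the cells and each time an unlabeled cell is reached stamp every cell carrying that name with the next integer, then rebuild the floor shape; no mapping structure is kept at all.
import Mathlib
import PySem

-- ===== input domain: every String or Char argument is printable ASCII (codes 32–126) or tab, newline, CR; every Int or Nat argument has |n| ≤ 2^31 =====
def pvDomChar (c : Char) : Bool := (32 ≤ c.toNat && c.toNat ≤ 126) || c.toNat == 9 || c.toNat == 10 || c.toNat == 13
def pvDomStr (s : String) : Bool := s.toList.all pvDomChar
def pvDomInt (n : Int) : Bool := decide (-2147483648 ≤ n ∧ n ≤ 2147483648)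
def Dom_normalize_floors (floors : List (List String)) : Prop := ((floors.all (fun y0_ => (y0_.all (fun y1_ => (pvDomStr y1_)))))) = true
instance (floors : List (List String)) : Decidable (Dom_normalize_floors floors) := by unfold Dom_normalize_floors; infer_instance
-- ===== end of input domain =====

-- B replaces A's rename table (dict + running counter built while emitting) by a stamping
-- sweep over flattened [typ, name, label] cells: each time the walk reaches a still-unlabeled
-- cell, all cells carrying that name are stamped with the next integer, then the floor shape
-- is rebuilt; objective: alternative algorithm, no speed claim.

-- ===== PORT A =====
-- item.split(" ") unpacked into (typ, name); fewer/more than 2 parts is a ValueError (excluded by Pre_)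
def pvSplit (item : String) : String × String :=
  match PySem.Str.split? item " " with
  | some [t, n] => (t, n)
  | _ => ("", "")

-- f"{typ} {k}"
def pvFmt (typ : String) (k : Int) : String := typ ++ " " ++ PySem.Int.toStr k

def pvAItem (st : PySem.Dict String Int × Int × List String) (item : String) :
    PySem.Dict String Int × Int × List String :=
  let renames := st.1
  let counter := st.2.1
  let new_floor := st.2.2
  let tn := pvSplit item
  match renames.get? tn.2 with
  | some v => (renames, counter, new_floor ++ [pvFmt tn.1 v])
  | none => (renames.insert tn.2 counter, counter + 1, new_floor ++ [pvFmt tn.1 counter])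

def pvAFloor (st : PySem.Dict String Int × Int × List (List String)) (floor : List String) :
    PySem.Dict String Int × Int × List (List String) :=
  let r := floor.foldl pvAItem (st.1, st.2.1, [])
  (r.1, r.2.1, st.2.2 ++ [r.2.2])

def normalize_floors (floors : List (List String)) : List (List String) :=
  (floors.foldl pvAFloor (PySem.Dict.empty, 1, [])).2.2

-- ===== PORT B =====
-- a cell [typ, name, label]
-- c[2] = counter for every cell c with c[1] == name
def pvStampF (nm : String) (k : Int) (x : String × String × Option Int) :
    String × String × Option Int :=
  if x.2.1 == nm then (x.1, x.2.1, some k) else x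

-- the 'for cell in cells' loop: done = cells already walked past, todo = cells still ahead;
-- mutation of the shared list is modelled by mapping the stamp over both parts
def pvSweepAux : List (String × String × Option Int) → List (String × String × Option Int) →
    Int → List (String × String × Option Int)
  | done, [], _ => done
  | done, c :: rest, k =>
    match c.2.2 with
    | some _ => pvSweepAux (done ++ [c]) rest k
    | none => pvSweepAux (done.map (pvStampF c.2.1 k) ++ [pvStampF c.2.1 k c])
                         (rest.map (pvStampF c.2.1 k)) (k + 1)
  termination_by done todo k => todo.length
  decreasing_by all_goals simp

-- rebuild the floor shape from the flat cell list (the iterator in Source B);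
-- after the sweep every label is some, so the getD default is never used
def pvUnflatten : List (List String) → List (String × String × Option Int) → List (List String)
  | [], _ => []
  | fl :: fls, cells =>
    (cells.take fl.length).map (fun c => pvFmt c.1 (c.2.2.getD 0)) ::
      pvUnflatten fls (cells.drop fl.length)

def normalize_floors_alt (floors : List (List String)) : List (List String) :=
  let cells := floors.flatMap (fun fl => fl.map (fun item =>
    (( pvSplit item).1, (pvSplit item).2, (none : Option Int))))
  pvUnflatten floors (pvSweepAux [] cells 1)

-- ===== PRECONDITION & SPEC =====
-- Pre_ excludes exactly the inputs where A raises ValueError: an item that does not split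
-- on " " into exactly two parts (i.e. whose space count differs from 1).
def Pre_normalize_floors (floors : List (List String)) : Prop :=
  (floors.all (fun floor => floor.all (fun item => item.toList.count ' ' == 1))) = true
instance (floors : List (List String)) : Decidable (Pre_normalize_floors floors) := by
  unfold Pre_normalize_floors; infer_instance

def pvWitness_normalize_floors : List (List String) :=
  [["generator a", "microchip b"], ["generator b"]]

def Spec_normalize_floors (floors : List (List String)) (out : List (List String)) : Prop :=
  out = normalize_floors_alt floors
instance (floors : List (List String)) (out : List (List String)) :
    Decidable (Spec_normalize_floors floors out) := by unfold Spec_normalize_floors; infer_instance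

-- ===== CLAIM (what is proved, stated in full; the proofs are below) =====
def Claim_equal_normalize_floors : Prop := ∀ (floors : List (List String)),
  Dom_normalize_floors floors → Pre_normalize_floors floors →
  Spec_normalize_floors floors (normalize_floors floors)

-- ===== LEMMAS AND PROOFS =====

-- the name of an item, and the per-item output once the global first-appearance order is fixed
def pvNm (item : String) : String := (pvSplit item).2

def pvOut (order : List String) (item : String) : String :=
  pvFmt (pvSplit item).1 ((order.idxOf (pvSplit item).2 : Int) + 1)

def pvAll (floors : List (List String)) : List String :=
  floors.flatMap (fun floor => floor.map pvNm)

-- A's loop invariant: the dict maps every seen name to its final number, counter = #distinct seen + 1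
def pvInv (all seen : List String) (d : PySem.Dict String Int) (c : Int) : Prop :=
  (∀ n : String, d.get? n =
      if n ∈ seen then some (((PySem.List.dedup all).idxOf n : Int) + 1) else none)
  ∧ c = ((PySem.List.dedup seen).length : Int) + 1

lemma pv_dedup_append_singleton (xs : List String) (n : String) :
    PySem.List.dedup (xs ++ [n]) =
      if n ∈ xs then PySem.List.dedup xs else PySem.List.dedup xs ++ [n] := by
  have : PySem.List.dedup (xs ++ [n]) = PySem.Set.add (PySem.List.dedup xs) n := by
    simp [PySem.List.dedup, PySem.Set.ofList, List.foldl_append]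
  rw [this, PySem.Set.add]
  by_cases h : n ∈ xs
  · simp [(PySem.Set.mem_ofList xs n).2 h, h]
  · simp [h]

lemma pv_dedup_prefix (xs ys : List String) :
    PySem.List.dedup xs <+: PySem.List.dedup (xs ++ ys) := by
  have h : ∀ (ys : List String) (s : PySem.Set String), s <+: ys.foldl PySem.Set.add s := by
    intro ys
    induction ys with
    | nil => intro s; exact List.prefix_rfl
    | cons y ys ih =>
      intro s
      refine List.IsPrefix.trans ?_ (ih (PySem.Set.add s y))
      rw [PySem.Set.add]; split
      · exact List.prefix_rfl
      · exact List.prefix_append s [y]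
  have : PySem.List.dedup (xs ++ ys) = ys.foldl PySem.Set.add (PySem.List.dedup xs) := by
    simp [PySem.List.dedup, PySem.Set.ofList, List.foldl_append]
  rw [this]; exact h ys _

-- the number a fresh name receives is the count of distinct names seen before it
lemma pv_idxOf_fresh (xs ys : List String) (n : String) (h : n ∉ xs) :
    (PySem.List.dedup (xs ++ n :: ys)).idxOf n = (PySem.List.dedup xs).length := by
  have hsplit : xs ++ n :: ys = (xs ++ [n]) ++ ys := by simp
  have hpre := pv_dedup_prefix (xs ++ [n]) ys
  have hd1 : PySem.List.dedup (xs ++ [n]) = PySem.List.dedup xs ++ [n] := by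
    rw [pv_dedup_append_singleton]; simp [h]
  have hmem : n ∈ PySem.List.dedup (xs ++ [n]) := by rw [hd1]; simp
  rw [hsplit, ← List.IsPrefix.idxOf_eq_of_mem hpre hmem, hd1]
  have hnd : n ∉ PySem.List.dedup xs := fun hc => h ((PySem.Set.mem_ofList xs n).1 hc)
  rw [List.idxOf_append_of_notMem hnd]
  simp

lemma pv_items_fold (items : List String) :
    ∀ (all seen : List String) (d : PySem.Dict String Int) (c : Int) (acc : List String),
    pvInv all seen d c →
    (∃ rest, all = seen ++ items.map pvNm ++ rest) →
    ∃ d₂ c₂, items.foldl pvAItem (d, c, acc) =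
        (d₂, c₂, acc ++ items.map (pvOut (PySem.List.dedup all)))
      ∧ pvInv all (seen ++ items.map pvNm) d₂ c₂ := by
  induction items with
  | nil => intro all seen d c acc hInv _; exact ⟨d, c, by simp, by simpa using hInv⟩
  | cons item items ih =>
    intro all seen d c acc hInv hrest
    obtain ⟨rest, hall⟩ := hrest
    obtain ⟨hd, hc⟩ := hInv
    have hstep : ∃ d₁ c₁, pvAItem (d, c, acc) item =
        (d₁, c₁, acc ++ [pvOut (PySem.List.dedup all) item]) ∧
        pvInv all (seen ++ [pvNm item]) d₁ c₁ := by
      by_cases hmem : pvNm item ∈ seen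
      · refine ⟨d, c, ?_, ?_, ?_⟩
        · simp only [pvAItem, pvNm] at *
          rw [hd]
          simp [hmem, pvOut]
        · intro m
          rw [hd m]
          by_cases hm : m = pvNm item
          · subst hm; simp [hmem]
          · simp [hm]
        · rw [hc, pv_dedup_append_singleton]
          simp [hmem]
      · refine ⟨d.insert (pvNm item) c, c + 1, ?_, ?_, ?_⟩
        · simp only [pvAItem, pvNm] at *
          rw [hd]
          simp only [hmem, if_false]
          have hfresh : ((PySem.List.dedup all).idxOf (pvSplit item).2 : Int)
              = ((PySem.List.dedup seen).length : Int) := by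
            have : all = seen ++ (pvSplit item).2 :: (items.map pvNm ++ rest) := by
              simpa [pvNm] using hall
            rw [this, pv_idxOf_fresh seen _ _ hmem]
          simp only [pvOut]
          rw [hfresh, hc]
        · intro m
          by_cases hm : m = pvNm item
          · subst hm
            rw [PySem.Dict.get?_insert_self]
            have : all = seen ++ pvNm item :: (items.map pvNm ++ rest) := by
              simpa using hall
            rw [this, pv_idxOf_fresh seen _ _ hmem]
            simp [hc]
          · rw [PySem.Dict.get?_insert_of_ne _ _ (fun hh => hm hh), hd m]
            simp [hm]
        · rw [hc, pv_dedup_append_singleton]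
          simp [hmem]
    obtain ⟨d₁, c₁, heq, hInv₁⟩ := hstep
    have hrest' : ∃ rest', all = (seen ++ [pvNm item]) ++ items.map pvNm ++ rest' := by
      exact ⟨rest, by simpa using hall⟩
    obtain ⟨d₂, c₂, heq₂, hInv₂⟩ :=
      ih all (seen ++ [pvNm item]) d₁ c₁ (acc ++ [pvOut (PySem.List.dedup all) item]) hInv₁ hrest'
    refine ⟨d₂, c₂, ?_, ?_⟩
    · simp only [List.foldl_cons, heq, heq₂]
      simp
    · simpa using hInv₂

lemma pv_floors_fold (fls : List (List String)) :
    ∀ (all seen : List String) (d : PySem.Dict String Int) (c : Int)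
      (acc : List (List String)),
    pvInv all seen d c →
    (∃ rest, all = seen ++ fls.flatMap (fun floor => floor.map pvNm) ++ rest) →
    ∃ d₂ c₂, fls.foldl pvAFloor (d, c, acc) =
        (d₂, c₂, acc ++ fls.map (fun floor => floor.map (pvOut (PySem.List.dedup all)))) := by
  induction fls with
  | nil => intro all seen d c acc _ _; exact ⟨d, c, by simp⟩
  | cons floor fls ih =>
    intro all seen d c acc hInv hrest
    obtain ⟨rest, hall⟩ := hrest
    obtain ⟨d₁, c₁, heq, hInv₁⟩ := pv_items_fold floor all seen d c [] hInv
      ⟨fls.flatMap (fun floor => floor.map pvNm) ++ rest, by simpa using hall⟩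
    obtain ⟨d₂, c₂, heq₂⟩ := ih all (seen ++ floor.map pvNm) d₁ c₁
      (acc ++ [floor.map (pvOut (PySem.List.dedup all))]) hInv₁
      ⟨rest, by simpa using hall⟩
    refine ⟨d₂, c₂, ?_⟩
    simp only [List.foldl_cons, pvAFloor, heq, List.nil_append]
    rw [heq₂]
    simp

lemma pv_inv_init (all : List String) : pvInv all [] PySem.Dict.empty 1 := by
  constructor
  · intro n; simp [PySem.Dict.get?, PySem.Dict.empty]
  · simp [PySem.List.dedup, PySem.Set.ofList, PySem.Set.empty]

lemma pv_A_eq (floors : List (List String)) :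
    normalize_floors floors =
      floors.map (fun floor => floor.map (pvOut (PySem.List.dedup (pvAll floors)))) := by
  obtain ⟨d₂, c₂, heq⟩ := pv_floors_fold floors (pvAll floors) [] PySem.Dict.empty 1 []
    (pv_inv_init _) ⟨[], by simp [pvAll]⟩
  simp [normalize_floors, heq]

-- the cell a pair has once exactly the names in `seen` have been stamped
def pvCellOf (all seen : List String) (p : String × String) : String × String × Option Int :=
  (p.1, p.2, if p.2 ∈ seen then some (((PySem.List.dedup all).idxOf p.2 : Int) + 1) else none)

lemma pv_sweep (all : List String) (todoP : List (String × String)) :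
    ∀ (doneP : List (String × String)),
    all = doneP.map Prod.snd ++ todoP.map Prod.snd →
    pvSweepAux (doneP.map (pvCellOf all (doneP.map Prod.snd)))
               (todoP.map (pvCellOf all (doneP.map Prod.snd)))
               (((PySem.List.dedup (doneP.map Prod.snd)).length : Int) + 1)
      = (doneP ++ todoP).map (pvCellOf all all) := by
  induction todoP with
  | nil =>
    intro doneP hall
    have hseen : doneP.map Prod.snd = all := by simpa using hall.symm
    simp [pvSweepAux, hseen]
  | cons p rest ih =>
    intro doneP hall
    by_cases hmem : p.2 ∈ doneP.map Prod.snd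
    · have hcell : pvCellOf all (doneP.map Prod.snd) p =
          (p.1, p.2, some (((PySem.List.dedup all).idxOf p.2 : Int) + 1)) := by
        simp [pvCellOf, hmem]
      have hdone' : (doneP ++ [p]).map (pvCellOf all ((doneP ++ [p]).map Prod.snd)) =
          doneP.map (pvCellOf all (doneP.map Prod.snd)) ++ [pvCellOf all (doneP.map Prod.snd) p] := by
        simp only [List.map_append]
        congr 1
        · refine List.map_congr_left (fun q hq => ?_)
          have hqmem : q.2 ∈ doneP.map Prod.snd := List.mem_map.2 ⟨q, hq, rfl⟩
          simp [pvCellOf, hqmem, List.mem_append, hqmem]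
        · simp [pvCellOf, List.mem_append, hmem]
      have hrest' : rest.map (pvCellOf all ((doneP ++ [p]).map Prod.snd)) =
          rest.map (pvCellOf all (doneP.map Prod.snd)) := by
        refine List.map_congr_left (fun q _ => ?_)
        by_cases hq : q.2 = p.2
        · simp [pvCellOf, hq, hmem]
        · have hiff : q.2 ∈ (doneP ++ [p]).map Prod.snd ↔ q.2 ∈ doneP.map Prod.snd := by
            simp [hq]
          simp only [pvCellOf, hiff]
      have hded : PySem.List.dedup ((doneP ++ [p]).map Prod.snd) =
          PySem.List.dedup (doneP.map Prod.snd) := by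
        rw [List.map_append]
        simpa [hmem] using pv_dedup_append_singleton (doneP.map Prod.snd) p.2
      have := ih (doneP ++ [p]) (by simpa using hall)
      rw [hdone', hrest', hded] at this
      simpa [pvSweepAux, hcell] using this
    · have hcell : pvCellOf all (doneP.map Prod.snd) p = (p.1, p.2, none) := by
        simp [pvCellOf, hmem]
      have hfresh : ((PySem.List.dedup all).idxOf p.2 : Int)
          = ((PySem.List.dedup (doneP.map Prod.snd)).length : Int) := by
        have : all = doneP.map Prod.snd ++ p.2 :: rest.map Prod.snd := by simpa using hall
        rw [this, pv_idxOf_fresh _ _ _ hmem]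
      -- stamping fixes the done part (no done cell carries the fresh name)
      have hdoneid : (doneP.map (pvCellOf all (doneP.map Prod.snd))).map
            (pvStampF p.2 (((PySem.List.dedup (doneP.map Prod.snd)).length : Int) + 1))
          = doneP.map (pvCellOf all (doneP.map Prod.snd)) := by
        rw [List.map_map]
        refine List.map_congr_left (fun q hq => ?_)
        have hqmem : q.2 ∈ doneP.map Prod.snd := List.mem_map.2 ⟨q, hq, rfl⟩
        have hne : q.2 ≠ p.2 := fun h => hmem (h ▸ hqmem)
        simp [pvStampF, pvCellOf, hne]
      have hdone' : (doneP ++ [p]).map (pvCellOf all ((doneP ++ [p]).map Prod.snd)) =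
          doneP.map (pvCellOf all (doneP.map Prod.snd)) ++
            [(p.1, p.2, some (((PySem.List.dedup (doneP.map Prod.snd)).length : Int) + 1))] := by
        simp only [List.map_append]
        congr 1
        · refine List.map_congr_left (fun q hq => ?_)
          have hqmem : q.2 ∈ doneP.map Prod.snd := List.mem_map.2 ⟨q, hq, rfl⟩
          simp [pvCellOf, hqmem, List.mem_append, hqmem]
        · have hf : (PySem.List.dedup all).idxOf p.2
              = (PySem.List.dedup (doneP.map Prod.snd)).length := by exact_mod_cast hfresh
          have hf' : List.idxOf p.2 (PySem.Set.ofList all)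
              = (PySem.Set.ofList (doneP.map Prod.snd)).length := hf
          simp [pvCellOf, hf']
      have hrest' : rest.map (pvCellOf all ((doneP ++ [p]).map Prod.snd)) =
          (rest.map (pvCellOf all (doneP.map Prod.snd))).map
            (pvStampF p.2 (((PySem.List.dedup (doneP.map Prod.snd)).length : Int) + 1)) := by
        rw [List.map_map]
        refine List.map_congr_left (fun q _ => ?_)
        have hf : (PySem.List.dedup all).idxOf p.2
            = (PySem.List.dedup (doneP.map Prod.snd)).length := by exact_mod_cast hfresh
        have hf' : List.idxOf p.2 (PySem.Set.ofList all)
            = (PySem.Set.ofList (doneP.map Prod.snd)).length := hf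
        by_cases hq : q.2 = p.2
        · have hnm : q.2 ∉ doneP.map Prod.snd := by rw [hq]; exact hmem
          simp [pvCellOf, pvStampF, hnm, hq, hf']
        · by_cases hm2 : q.2 ∈ doneP.map Prod.snd
          · have hm3 : q.2 ∈ (doneP ++ [p]).map Prod.snd := by simp [hm2]
            simp [pvCellOf, pvStampF, hm2, hm3, hq]
          · have hm3 : q.2 ∉ (doneP ++ [p]).map Prod.snd := by simp [hm2, hq]
            simp [pvCellOf, pvStampF, hm2, hm3, hq]
      have hded : PySem.List.dedup ((doneP ++ [p]).map Prod.snd) =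
          PySem.List.dedup (doneP.map Prod.snd) ++ [p.2] := by
        rw [List.map_append]
        simpa [hmem] using pv_dedup_append_singleton (doneP.map Prod.snd) p.2
      have := ih (doneP ++ [p]) (by simpa using hall)
      rw [hdone', hrest', hded] at this
      have hstampc : pvStampF p.2 (((PySem.List.dedup (doneP.map Prod.snd)).length : Int) + 1)
            (p.1, p.2, (none : Option Int))
          = (p.1, p.2, some (((PySem.List.dedup (doneP.map Prod.snd)).length : Int) + 1)) := by
        simp [pvStampF]
      rw [List.map_cons, hcell]
      rw [pvSweepAux]
      simp only []
      rw [hdoneid, hstampc]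
      have hlen2 : ((PySem.List.dedup (doneP.map Prod.snd) ++ [p.2]).length : Int)
          = ((PySem.List.dedup (doneP.map Prod.snd)).length : Int) + 1 := by
        simp
      rw [hlen2] at this
      simpa using this

lemma pv_unflatten (g : String → String × String × Option Int) (floors : List (List String)) :
    pvUnflatten floors (floors.flatMap (fun fl => fl.map g)) =
      floors.map (fun fl => fl.map (fun it => pvFmt (g it).1 ((g it).2.2.getD 0))) := by
  induction floors with
  | nil => simp [pvUnflatten]
  | cons fl fls ih =>
    have hlen : (fl.map g).length = fl.length := by simp
    simp only [List.flatMap_cons, pvUnflatten]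
    rw [List.take_left' hlen, List.drop_left' hlen]
    simp [ih, List.map_map, Function.comp_def]

lemma pv_B_eq (floors : List (List String)) :
    normalize_floors_alt floors =
      floors.map (fun floor => floor.map (pvOut (PySem.List.dedup (pvAll floors)))) := by
  have hBdef : normalize_floors_alt floors = pvUnflatten floors (pvSweepAux []
      (floors.flatMap (fun fl => fl.map (fun item =>
        ((pvSplit item).1, (pvSplit item).2, (none : Option Int))))) 1) := rfl
  rw [hBdef]
  have hcells : floors.flatMap (fun fl => fl.map (fun item =>
        ((pvSplit item).1, (pvSplit item).2, (none : Option Int)))) =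
      (floors.flatMap (fun fl => fl.map pvSplit)).map (pvCellOf (pvAll floors) []) := by
    simp [List.map_flatMap, List.map_map, Function.comp_def, pvCellOf]
  have hall : pvAll floors = ([] : List (String × String)).map Prod.snd ++
      (floors.flatMap (fun fl => fl.map pvSplit)).map Prod.snd := by
    simp only [pvAll, List.map_nil, List.nil_append, List.map_flatMap, List.map_map]
    rfl
  have hded0 : ((PySem.List.dedup (([] : List (String × String)).map Prod.snd)).length : Int) + 1
      = (1 : Int) := by
    simp [PySem.List.dedup, PySem.Set.ofList, PySem.Set.empty]
  have hsweep := pv_sweep (pvAll floors) (floors.flatMap (fun fl => fl.map pvSplit)) [] hall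
  rw [hded0] at hsweep
  simp only [List.map_nil, List.nil_append] at hsweep
  rw [hcells, hsweep]
  have hflat : (floors.flatMap (fun fl => fl.map pvSplit)).map (pvCellOf (pvAll floors) (pvAll floors))
      = floors.flatMap (fun fl => fl.map (pvCellOf (pvAll floors) (pvAll floors) ∘ pvSplit)) := by
    simp [List.map_flatMap, List.map_map]
  rw [hflat, pv_unflatten]
  refine List.map_congr_left (fun floor hfloor => List.map_congr_left (fun item hitem => ?_))
  have hmem : (pvSplit item).2 ∈ pvAll floors := by
    exact List.mem_flatMap.2 ⟨floor, hfloor, List.mem_map.2 ⟨item, hitem, rfl⟩⟩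
  simp [pvCellOf, Function.comp_def, hmem, pvOut]

-- ===== VERDICT (by name: the statement is the Claim_ definition above) =====
theorem normalize_floors_spec : Claim_equal_normalize_floors := by
  intro floors _ _
  unfold Spec_normalize_floors
  rw [pv_A_eq, pv_B_eq]
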